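-- pv_equiv track=rewrite | github.com/skapoor68/hypatia | satgenpy/satgen/post_analysis/print_path_life.py | calculate_path_life
-- ===== SOURCE A (Python) =====
-- def calculate_path_life(latency):
--     start = -1
--
--     for i in range(len(latency)):
--         if latency[i] != -1:
--             if start == -1:
--                 start = i
--
--         else:
--             if start != -1:
--                 return i - start
--
--     if start == -1:
--         return -1
--     return len(latency) - start
-- ===== SOURCE B (Python) =====
-- def calculate_path_life(latency):
--     # Phase 1: run-length-encode the list into maximal (is_live, length) runs,
--     # where is_live means the value is not -1 (a groupby-style compression).
--     runs = []
--     for x in latency: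
--         live = (x != -1)
--         if runs and runs[-1][0] == live:
--             runs[-1] = (live, runs[-1][1] + 1)
--         else:
--             runs.append((live, 1))
--     # Phase 2: scan the runs; the first live run's length is the answer.
--     for live, length in runs:
--         if live:
--             return length
--     return -1
-- ===== Notes on version B (the rewrite author's own statement) =====
-- stated objective: alternative
-- what changed: Replaces A's single-pass index/flag state machine with a two-stage grouping strategy: first run-length-encode the list into maximal (is_live, length) runs, then scan the run list and return the first live run's length (or -1 if none).
import Mathlib
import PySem

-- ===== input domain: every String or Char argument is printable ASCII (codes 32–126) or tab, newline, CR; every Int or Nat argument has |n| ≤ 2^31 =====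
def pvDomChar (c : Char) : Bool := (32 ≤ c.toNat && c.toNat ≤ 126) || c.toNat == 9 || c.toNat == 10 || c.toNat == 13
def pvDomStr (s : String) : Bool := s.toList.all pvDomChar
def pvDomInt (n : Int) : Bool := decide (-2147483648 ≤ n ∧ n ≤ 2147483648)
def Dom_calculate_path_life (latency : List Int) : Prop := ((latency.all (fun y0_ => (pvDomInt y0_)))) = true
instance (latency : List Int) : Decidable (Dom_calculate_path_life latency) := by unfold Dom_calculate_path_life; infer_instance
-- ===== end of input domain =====

-- B replaces A's index/flag state machine by a two-stage grouping strategy: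
-- run-length-encode the list into maximal (is_live, length) runs, then scan the
-- run list for the first live run; an alternative of the same cost.

-- ===== PORT A =====
-- A's loop over range(len(latency)) with state (i, start) and two early returns.
def calcA_go (full rem : List Int) (i start : Int) : Int :=
  match rem with
  | [] => if start = -1 then -1 else (full.length : Int) - start
  | x :: rest =>
    if x ≠ -1 then
      if start = -1 then calcA_go full rest (i + 1) i
      else calcA_go full rest (i + 1) start
    else
      if start ≠ -1 then i - start
      else calcA_go full rest (i + 1) start

def calculate_path_life (latency : List Int) : Int :=
  calcA_go latency latency 0 (-1)

-- ===== PORT B =====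
-- Phase 1 of Source B: the loop body (append at the end / modify the last entry) is
-- ported exactly, with the runs list kept head-first (newest run at the head) and
-- reversed once after the fold — the standard transliteration of tail-append.
def stepB (acc : List (Bool × Nat)) (x : Int) : List (Bool × Nat) :=
  let live : Bool := x != -1
  match acc with
  | (k, c) :: rest => if k == live then (k, c + 1) :: rest else (live, 1) :: (k, c) :: rest
  | [] => [(live, 1)]

def runsB (latency : List Int) : List (Bool × Nat) :=
  (latency.foldl stepB []).reverse

-- Phase 2 of Source B: first live run's length, else -1.
def firstLive : List (Bool × Nat) → Int
  | [] => -1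
  | (k, c) :: rest => if k then (c : Int) else firstLive rest

def calculate_path_life_alt (latency : List Int) : Int :=
  firstLive (runsB latency)

-- ===== PRECONDITION & SPEC =====
def Spec_calculate_path_life (latency : List Int) (out : Int) : Prop := out = calculate_path_life_alt latency
instance (latency : List Int) (out : Int) : Decidable (Spec_calculate_path_life latency out) := by unfold Spec_calculate_path_life; infer_instance

-- ===== CLAIM =====
def Claim_equal_calculate_path_life : Prop := ∀ (latency : List Int), Dom_calculate_path_life latency → Spec_calculate_path_life latency (calculate_path_life latency)

-- ===== LEMMAS AND PROOFS =====

-- reference value: length of the first maximal non-(-1) run, or -1 if none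
def pvRun (l : List Int) : Int :=
  if l.dropWhile (fun x => x == (-1 : Int)) = [] then -1
  else (((l.dropWhile (fun x => x == (-1 : Int))).takeWhile (fun x => x != (-1 : Int))).length : Int)

-- the same value on the boolean shadow (true = live)
def pvRunB (w : List Bool) : Int :=
  if w.dropWhile (fun b => !b) = [] then -1
  else ((w.dropWhile (fun b => !b)).takeWhile id).length

def keyf (x : Int) : Bool := x != -1

def word (r : List (Bool × Nat)) : List Bool :=
  r.flatMap (fun p => List.replicate p.2 p.1)

def OkRuns (r : List (Bool × Nat)) : Prop :=
  List.IsChain (fun p q => p.1 ≠ q.1) r ∧ ∀ p ∈ r, 1 ≤ p.2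

-- ---------- A equals pvRun ----------
theorem calcA_go_started (full : List Int) :
    ∀ (rem : List Int) (j start : Int), start ≠ -1 →
      j + rem.length = (full.length : Int) →
      calcA_go full rem j start
        = j + ((rem.takeWhile (fun x => x != (-1 : Int))).length : Int) - start := by
  intro rem
  induction rem with
  | nil =>
    intro j start hs hlen
    simp at hlen
    simp [calcA_go, hs, List.takeWhile]
    omega
  | cons x rest ih =>
    intro j start hs hlen
    by_cases hx : x = -1
    · subst hx
      simp [calcA_go, hs, List.takeWhile]
    · rw [calcA_go]
      simp only [if_pos hx, if_neg hs]
      rw [ih (j + 1) start hs (by simp at hlen ⊢; omega)]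
      simp [hx]
      omega

theorem calcA_go_scan (full : List Int) :
    ∀ (rem : List Int) (i : Int), 0 ≤ i →
      i + rem.length = (full.length : Int) →
      calcA_go full rem i (-1) = pvRun rem := by
  intro rem
  induction rem with
  | nil => intro i _ _; simp [calcA_go, pvRun]
  | cons x rest ih =>
    intro i hi hlen
    by_cases hx : x = -1
    · subst hx
      rw [calcA_go]
      simp only [ne_eq, not_true_eq_false, if_false]
      rw [ih (i + 1) (by omega) (by simp at hlen ⊢; omega)]
      simp [pvRun]
    · have hxb : (x == (-1 : Int)) = false := by simpa using hx
      rw [calcA_go]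
      simp only [if_pos hx, if_true]
      rw [calcA_go_started full rest (i + 1) i (by omega)
            (by simp at hlen ⊢; omega)]
      simp [pvRun, hxb, hx]
      omega

theorem calcA_eq_pvRun (latency : List Int) :
    calculate_path_life latency = pvRun latency := by
  unfold calculate_path_life
  exact calcA_go_scan latency latency 0 le_rfl (by simp)

-- ---------- pvRun equals pvRunB on the boolean shadow ----------
theorem pvRun_eq_pvRunB (l : List Int) : pvRun l = pvRunB (l.map keyf) := by
  induction l with
  | nil => simp [pvRun, pvRunB]
  | cons x t ih =>
    by_cases hx : x = -1
    · subst hx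
      simpa [pvRun, pvRunB, keyf, List.dropWhile_cons] using ih
    · have hxb : (x == (-1 : Int)) = false := by simpa using hx
      have hxk : keyf x = true := by simp [keyf, hx]
      have aux : ∀ (s : List Int),
          (s.takeWhile (fun y => y != (-1 : Int))).length
            = ((s.map keyf).takeWhile id).length := by
        intro s
        induction s with
        | nil => simp
        | cons y ys ihs =>
          by_cases hy : y = -1
          · subst hy; simp [keyf, List.takeWhile_cons]
          · have hyk : (y != (-1 : Int)) = true := by simpa using hy
            simp [keyf, List.takeWhile_cons, hyk, ihs]
      simp [pvRun, pvRunB, List.dropWhile_cons, List.takeWhile_cons, hxb, hxk, hx, aux t]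

-- ---------- the fold invariant ----------
theorem stepB_word (acc : List (Bool × Nat)) (x : Int) :
    word (stepB acc x).reverse = word acc.reverse ++ [keyf x] := by
  unfold stepB keyf
  cases acc with
  | nil => simp [word]
  | cons p rest =>
    obtain ⟨k, c⟩ := p
    by_cases hk : k = (x != -1)
    · subst hk
      simp only [BEq.rfl, if_true]
      simp [word, List.flatMap_append, List.replicate_succ']
    · have : (k == (x != -1)) = false := by simpa using hk
      simp only [this, Bool.false_eq_true, if_false]
      simp [word, List.flatMap_append]

theorem stepB_ok (acc : List (Bool × Nat)) (x : Int) (h : OkRuns acc) :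
    OkRuns (stepB acc x) := by
  obtain ⟨hc, hp⟩ := h
  unfold stepB
  cases acc with
  | nil => exact ⟨List.isChain_singleton _, by simp⟩
  | cons p rest =>
    obtain ⟨k, c⟩ := p
    by_cases hk : k = (x != -1)
    · subst hk
      simp only [BEq.rfl, if_true]
      refine ⟨?_, ?_⟩
      · exact (List.isChain_cons).mpr
          ⟨fun q hq => ((List.isChain_cons).mp hc).1 q hq,
           ((List.isChain_cons).mp hc).2⟩
      · intro q hq
        rcases List.mem_cons.mp hq with h1 | h2
        · subst h1; omega
        · exact hp q (List.mem_cons_of_mem _ h2)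
    · have hkb : (k == (x != -1)) = false := by simpa using hk
      simp only [hkb, Bool.false_eq_true, if_false]
      refine ⟨?_, ?_⟩
      · exact (List.isChain_cons).mpr ⟨by
          intro y hy
          simp only [List.head?_cons, Option.mem_def, Option.some_inj] at hy
          subst hy
          exact fun h' => hk h'.symm, hc⟩
      · intro q hq
        rcases List.mem_cons.mp hq with h1 | h2
        · subst h1; omega
        · exact hp q h2

theorem foldl_inv :
    ∀ (xs : List Int) (acc : List (Bool × Nat)), OkRuns acc →
      OkRuns (xs.foldl stepB acc) ∧
        word (xs.foldl stepB acc).reverse = word acc.reverse ++ xs.map keyf := by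
  intro xs
  induction xs with
  | nil => intro acc h; refine ⟨h, ?_⟩; simp
  | cons x t ih =>
    intro acc h
    have hstep := stepB_ok acc x h
    obtain ⟨h1, h2⟩ := ih (stepB acc x) hstep
    refine ⟨h1, ?_⟩
    simp only [List.foldl_cons] at *
    rw [h2, stepB_word]
    simp

-- ---------- firstLive on well-formed runs ----------
theorem dropWhile_not_replicate_false (c : Nat) (w : List Bool) :
    (List.replicate c false ++ w).dropWhile (fun b => !b) = w.dropWhile (fun b => !b) := by
  induction c with
  | zero => simp
  | succ n ih => simpa [List.replicate_succ, List.dropWhile_cons] using ih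

theorem takeWhile_id_replicate_true (c : Nat) (w : List Bool) :
    (List.replicate c true ++ w).takeWhile id = List.replicate c true ++ w.takeWhile id := by
  induction c with
  | zero => simp
  | succ n ih => simpa [List.replicate_succ, List.takeWhile_cons] using ih

theorem word_head_false (r : List (Bool × Nat)) (hok : OkRuns r)
    (hhead : ∀ k c rest, r = (k, c) :: rest → k = false) :
    (word r).takeWhile id = [] := by
  cases r with
  | nil => simp [word]
  | cons p rest =>
    obtain ⟨k, c⟩ := p
    have hk : k = false := hhead k c rest rfl
    subst hk
    have hc : 1 ≤ c := hok.2 (false, c) List.mem_cons_self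
    obtain ⟨c', rfl⟩ : ∃ c', c = c' + 1 := ⟨c - 1, by omega⟩
    simp [word, List.replicate_succ, List.takeWhile_cons]

theorem firstLive_eq (r : List (Bool × Nat)) (hok : OkRuns r) :
    firstLive r = pvRunB (word r) := by
  induction r with
  | nil => simp [firstLive, word, pvRunB]
  | cons p rest ih =>
    obtain ⟨k, c⟩ := p
    have hc : 1 ≤ c := hok.2 (k, c) List.mem_cons_self
    have hok' : OkRuns rest := ⟨hok.1.tail, fun q hq => hok.2 q (List.mem_cons_of_mem _ hq)⟩
    obtain ⟨c', rfl⟩ : ∃ c', c = c' + 1 := ⟨c - 1, by omega⟩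
    cases k with
    | false =>
      have : word ((false, c' + 1) :: rest) = List.replicate (c' + 1) false ++ word rest := by
        simp [word]
      rw [firstLive, this, pvRunB, dropWhile_not_replicate_false, if_neg (by simp)]
      rw [ih hok']
      rfl
    | true =>
      have hw : word ((true, c' + 1) :: rest) = List.replicate (c' + 1) true ++ word rest := by
        simp [word]
      have htail : (word rest).takeWhile id = [] := by
        apply word_head_false rest hok'
        intro k2 c2 rest2 heq
        have := hok.1
        rw [heq] at this
        have hne : (true : Bool) ≠ k2 := by
          have := (List.isChain_cons.mp this).1 (k2, c2) (by simp)
          simpa using this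
        cases k2 with
        | false => rfl
        | true => exact absurd rfl hne
      rw [firstLive, if_pos rfl, hw, pvRunB]
      rw [show (c' + 1) = c' + 1 from rfl]
      have hdw : (List.replicate (c' + 1) true ++ word rest).dropWhile (fun b => !b)
          = List.replicate (c' + 1) true ++ word rest := by
        simp [List.replicate_succ, List.dropWhile_cons]
      rw [hdw, if_neg (by simp [List.replicate_succ]), takeWhile_id_replicate_true, htail]
      simp

theorem calcB_eq_pvRun (latency : List Int) :
    calculate_path_life_alt latency = pvRun latency := by
  unfold calculate_path_life_alt runsB
  have hok0 : OkRuns ([] : List (Bool × Nat)) := ⟨List.isChain_nil, by simp⟩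
  obtain ⟨hok, hword⟩ := foldl_inv latency [] hok0
  have hrev : OkRuns (latency.foldl stepB []).reverse := by
    refine ⟨?_, fun q hq => hok.2 q (List.mem_reverse.mp hq)⟩
    rw [List.isChain_reverse]
    exact hok.1.imp (fun {a b} h => fun h' => h h'.symm)
  have hw : word (latency.foldl stepB []).reverse = latency.map keyf := by
    rw [hword]; simp [word]
  rw [firstLive_eq _ hrev, hw]
  exact (pvRun_eq_pvRunB latency).symm

-- ===== VERDICT =====
theorem calculate_path_life_spec : Claim_equal_calculate_path_life := by
  intro latency _
  unfold Spec_calculate_path_life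
  rw [calcA_eq_pvRun, calcB_eq_pvRun]
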